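-- pv_equiv track=rewrite | github.com/Sayeem2004/CodingBat | Python/p217930.py | countPrimeDigits
-- ===== SOURCE A (Python) =====
-- def countPrimeDigits(n):
--   s = 0
--   n = str(n)
--   for i in n:
--     if i != "-":
--       if int(i) == 2 or int(i) == 3 or int(i) == 5 or int(i) == 7:
--         s = s + 1
--   return s
-- ===== SOURCE B (Python) =====
-- def countPrimeDigits(n):
--     n = abs(n)
--     count = 0
--     while True:
--         if n % 10 in (2, 3, 5, 7):
--             count += 1
--         n //= 10
--         if n == 0:
--             break
--     return count
-- ===== Notes on version B (the rewrite author's own statement) =====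
-- stated objective: idiomatic
-- what changed: B counts prime digits by arithmetic digit extraction (remainder and floor-division by ten on the absolute value, in a do-while loop) instead of converting the number to a string and parsing each character back with int().
import Mathlib
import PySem

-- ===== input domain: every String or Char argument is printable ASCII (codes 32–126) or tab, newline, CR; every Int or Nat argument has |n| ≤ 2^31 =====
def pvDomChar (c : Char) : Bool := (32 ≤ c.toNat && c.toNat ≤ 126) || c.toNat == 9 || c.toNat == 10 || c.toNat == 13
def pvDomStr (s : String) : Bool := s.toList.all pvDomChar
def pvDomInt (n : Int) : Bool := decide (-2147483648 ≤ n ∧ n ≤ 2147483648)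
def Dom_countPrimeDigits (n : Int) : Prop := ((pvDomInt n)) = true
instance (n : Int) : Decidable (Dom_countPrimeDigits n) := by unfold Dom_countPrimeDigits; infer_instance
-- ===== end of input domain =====

-- B traverses the digits arithmetically (n % 10, n //= 10 on |n|) instead of
-- converting to a string and parsing each character back with int(); same cost,
-- more idiomatic.

-- ===== PORT A =====
-- literal transliteration of A: s = 0; for each character i of str(n):
-- if i != '-' and int(i) in {2,3,5,7} then s += 1.  int(i) is PySem.Int.ofChars? [i]
-- (always `some d` here, since every non-'-' character of str(n) is a digit).
def countPrimeDigits (n : Int) : Int :=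
  (PySem.Int.toStr n).toList.foldl
    (fun s i =>
      if i ≠ '-' then
        if PySem.Int.ofChars? [i] = some 2 ∨ PySem.Int.ofChars? [i] = some 3 ∨
           PySem.Int.ofChars? [i] = some 5 ∨ PySem.Int.ofChars? [i] = some 7 then
          s + 1
        else s
      else s) 0

-- ===== PORT B =====
-- B's do-while loop on m = |n|: count (m % 10 ∈ {2,3,5,7}), m //= 10, stop when m = 0.
def countPrimeDigitsLoop (m : Nat) (count : Int) : Int :=
  if h : m / 10 = 0 then
    (if m % 10 = 2 ∨ m % 10 = 3 ∨ m % 10 = 5 ∨ m % 10 = 7 then count + 1 else count)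
  else
    countPrimeDigitsLoop (m / 10)
      (if m % 10 = 2 ∨ m % 10 = 3 ∨ m % 10 = 5 ∨ m % 10 = 7 then count + 1 else count)
decreasing_by exact Nat.div_lt_self (Nat.pos_of_ne_zero (fun h0 => h (by simp [h0]))) (by omega)

def countPrimeDigits_alt (n : Int) : Int := countPrimeDigitsLoop n.natAbs 0

-- ===== PRECONDITION & SPEC =====
def Spec_countPrimeDigits (n : Int) (out : Int) : Prop := out = countPrimeDigits_alt n
instance (n : Int) (out : Int) : Decidable (Spec_countPrimeDigits n out) := by unfold Spec_countPrimeDigits; infer_instance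

-- ===== CLAIM (what is proved, stated in full; the proofs are below) =====
def Claim_equal_countPrimeDigits : Prop := ∀ (n : Int), Dom_countPrimeDigits n → Spec_countPrimeDigits n (countPrimeDigits n)

-- ===== LEMMAS AND PROOFS =====

-- per-character contribution of A's loop body
def pvCharCnt (i : Char) : Int :=
  if i ≠ '-' then
    if PySem.Int.ofChars? [i] = some 2 ∨ PySem.Int.ofChars? [i] = some 3 ∨
       PySem.Int.ofChars? [i] = some 5 ∨ PySem.Int.ofChars? [i] = some 7 then 1 else 0
  else 0

def pvCnt : List Char → Int
  | [] => 0
  | c :: cs => pvCharCnt c + pvCnt cs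

theorem pvFoldl_eq_cnt (cs : List Char) (s : Int) :
    cs.foldl
      (fun s i =>
        if i ≠ '-' then
          if PySem.Int.ofChars? [i] = some 2 ∨ PySem.Int.ofChars? [i] = some 3 ∨
             PySem.Int.ofChars? [i] = some 5 ∨ PySem.Int.ofChars? [i] = some 7 then
            s + 1
          else s
        else s) s = s + pvCnt cs := by
  induction cs generalizing s with
  | nil => simp [pvCnt]
  | cons c cs ih =>
    simp only [List.foldl, pvCnt, ih]
    unfold pvCharCnt
    split_ifs <;> ring

theorem pvCharCnt_digit (d : Nat) (hd : d < 10) :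
    pvCharCnt d.digitChar = if d = 2 ∨ d = 3 ∨ d = 5 ∨ d = 7 then 1 else 0 := by
  interval_cases d <;> decide

theorem pvLoop_shift (m : Nat) (c : Int) :
    countPrimeDigitsLoop m c = c + countPrimeDigitsLoop m 0 := by
  induction m using Nat.strong_induction_on generalizing c with
  | _ m ih =>
    conv_lhs => rw [countPrimeDigitsLoop.eq_def]
    conv_rhs => rw [countPrimeDigitsLoop.eq_def]
    split_ifs with h1 hp hp
    · ring
    · ring
    · rw [ih (m / 10) (by omega) (c + 1), ih (m / 10) (by omega) (0 + 1)]
      ring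
    · rw [ih (m / 10) (by omega) c]

theorem pvCnt_toDigitsCore (f : Nat) : ∀ (m : Nat) (l : List Char), m < f →
    pvCnt (Nat.toDigitsCore 10 f m l) = countPrimeDigitsLoop m 0 + pvCnt l := by
  induction f with
  | zero => intro m l h; omega
  | succ f ih =>
    intro m l h
    rw [Nat.toDigitsCore]
    conv_rhs => rw [countPrimeDigitsLoop.eq_def]
    have hd : m % 10 < 10 := Nat.mod_lt _ (by omega)
    split_ifs with h10 hp hp
    · rw [pvCnt, pvCharCnt_digit _ hd, if_pos hp]
      ring
    · rw [pvCnt, pvCharCnt_digit _ hd, if_neg hp]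
    · rw [ih (m / 10) ((m % 10).digitChar :: l) (by omega), pvCnt,
          pvCharCnt_digit _ hd, if_pos hp, pvLoop_shift (m / 10) (0 + 1)]
      ring
    · rw [ih (m / 10) ((m % 10).digitChar :: l) (by omega), pvCnt,
          pvCharCnt_digit _ hd, if_neg hp]
      ring

theorem pvCnt_toDigits (m : Nat) :
    pvCnt (Nat.toDigits 10 m) = countPrimeDigitsLoop m 0 := by
  rw [Nat.toDigits, pvCnt_toDigitsCore (m + 1) m [] (by omega)]
  simp [pvCnt]

-- ===== VERDICT (by name: the statement is the Claim_ definition above) =====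
theorem countPrimeDigits_spec : Claim_equal_countPrimeDigits := by
  intro n _
  unfold Spec_countPrimeDigits countPrimeDigits countPrimeDigits_alt
  rw [PySem.Int.toList_toStr]
  unfold PySem.Int.toChars
  rw [pvFoldl_eq_cnt]
  split_ifs with h
  · rw [pvCnt, pvCnt_toDigits]
    have h1 : pvCharCnt '-' = 0 := by decide
    rw [h1]
    ring
  · rw [pvCnt_toDigits]
    have h2 : n.toNat = n.natAbs := by omega
    rw [h2]
    ring
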